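-- pv_equiv track=rewrite | github.com/Nazzcodek/challenge | first.py | third_unlock
-- ===== SOURCE A (Python) =====
-- def third_unlock(range_start, range_end):
--     code = 0
--     for digit1 in range(range_start,range_end):
--         for digit2 in range(range_start,range_end):
--             for digit3 in range(range_start,range_end):
--                 if digit1 % 2 == 0 and digit2 % 2 == 0 and digit3 % 2 == 0:
--                     code += 1
--     return code
-- ===== SOURCE B (Python) =====
-- def third_unlock(range_start, range_end):
--     # closed form: (number of even integers in [range_start, range_end)) cubed
--     if range_end <= range_start:
--         return 0
--     evens = (-range_start) // 2 - (-range_end) // 2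
--     return evens ** 3
-- ===== Notes on version B (the rewrite author's own statement) =====
-- stated objective: simpler
-- what changed: replaced the triple nested loop by a closed form: the cube of the count of even integers in the range, computed arithmetically
import Mathlib
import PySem

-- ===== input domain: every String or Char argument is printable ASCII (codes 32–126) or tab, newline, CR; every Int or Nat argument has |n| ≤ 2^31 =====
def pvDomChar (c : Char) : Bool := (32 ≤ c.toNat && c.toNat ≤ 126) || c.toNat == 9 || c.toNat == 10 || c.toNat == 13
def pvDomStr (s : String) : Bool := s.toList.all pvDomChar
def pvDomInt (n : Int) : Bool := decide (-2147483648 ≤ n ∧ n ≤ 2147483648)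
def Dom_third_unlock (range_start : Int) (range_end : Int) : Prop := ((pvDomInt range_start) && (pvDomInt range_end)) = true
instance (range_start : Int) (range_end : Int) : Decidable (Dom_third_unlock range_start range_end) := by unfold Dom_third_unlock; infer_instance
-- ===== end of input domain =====

-- B replaces A's triple nested loop by a closed form: the cube of the count of even integers in the range.

-- ===== PORT A =====
def pvEven (d : Int) : Bool := PySem.Int.mod d 2 == 0

def third_unlock (range_start : Int) (range_end : Int) : Int :=
  (PySem.List.pyRange range_start range_end 1).foldl (fun code digit1 =>
    (PySem.List.pyRange range_start range_end 1).foldl (fun code digit2 =>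
      (PySem.List.pyRange range_start range_end 1).foldl (fun code digit3 =>
        if pvEven digit1 && pvEven digit2 && pvEven digit3 then code + 1 else code)
        code) code) 0

-- ===== PORT B =====
def third_unlock_alt (range_start : Int) (range_end : Int) : Int :=
  if range_end ≤ range_start then 0
  else
    let evens := PySem.Int.floordiv (-range_start) 2 - PySem.Int.floordiv (-range_end) 2
    evens ^ 3

-- ===== PRECONDITION & SPEC =====
def Spec_third_unlock (range_start : Int) (range_end : Int) (out : Int) : Prop := out = third_unlock_alt range_start range_end
instance (range_start : Int) (range_end : Int) (out : Int) : Decidable (Spec_third_unlock range_start range_end out) := by unfold Spec_third_unlock; infer_instance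

-- ===== CLAIM (what is proved, stated in full; the proofs are below) =====
def Claim_equal_third_unlock : Prop := ∀ (range_start : Int) (range_end : Int), Dom_third_unlock range_start range_end → Spec_third_unlock range_start range_end (third_unlock range_start range_end)

-- ===== LEMMAS AND PROOFS =====

-- a counting fold is countP
theorem pv_foldl_count (p : Int → Bool) (l : List Int) : ∀ (c : Int),
    l.foldl (fun code d => if p d then code + 1 else code) c = c + (l.countP p : Int) := by
  induction l with
  | nil => intro c; simp
  | cons a l ih =>
    intro c
    simp only [List.foldl_cons, List.countP_cons, ih]
    by_cases h : p a <;> simp [h] <;> ring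

-- a fold adding (if p d then N else 0) is countP * N
theorem pv_foldl_add_ite (p : Int → Bool) (N : Int) (l : List Int) : ∀ (c : Int),
    l.foldl (fun code d => code + (if p d then N else 0)) c = c + (l.countP p : Int) * N := by
  induction l with
  | nil => intro c; simp
  | cons a l ih =>
    intro c
    simp only [List.foldl_cons, List.countP_cons, ih]
    by_cases h : p a <;> simp [h] <;> ring

theorem pv_countP_and (b : Bool) (l : List Int) :
    (l.countP (fun d => b && pvEven d) : Int) = if b then (l.countP pvEven : Int) else 0 := by
  cases b <;> simp

-- the even count in range(s, e) in closed form
theorem pv_even_count (n : Nat) : ∀ (s e : Int), e - s = n →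
    ((PySem.List.pyRange s e 1).countP pvEven : Int)
      = PySem.Int.floordiv (-s) 2 - PySem.Int.floordiv (-e) 2 := by
  induction n with
  | zero =>
    intro s e h
    have hse : e = s := by omega
    subst hse
    simp [PySem.List.pyRange_one_eq_nil le_rfl]
  | succ n ih =>
    intro s e h
    have hlt : s < e := by omega
    rw [PySem.List.pyRange_one_cons hlt, List.countP_cons]
    have hrec := ih (s + 1) e (by omega)
    push_cast
    rw [hrec]
    simp only [PySem.Int.floordiv_eq_ediv_of_pos (by norm_num : (0:Int) < 2),
      pvEven, PySem.Int.mod_eq_emod_of_pos (by norm_num : (0:Int) < 2)]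
    by_cases hp : s % 2 = 0 <;> simp [hp] <;> omega

theorem pv_A_closed (s e : Int) :
    third_unlock s e = ((PySem.List.pyRange s e 1).countP pvEven : Int) ^ 3 := by
  unfold third_unlock
  set l := PySem.List.pyRange s e 1 with hl
  set E : Int := (l.countP pvEven : Int) with hE
  have h3 : ∀ (b : Bool) (c : Int),
      l.foldl (fun code d3 => if b && pvEven d3 then code + 1 else code) c
        = c + (if b then E else 0) := by
    intro b c
    rw [pv_foldl_count (fun d => b && pvEven d) l c, pv_countP_and]
  have hinner : ∀ (d1 d2 : Int) (c : Int),
      l.foldl (fun code d3 => if pvEven d1 && pvEven d2 && pvEven d3 then code + 1 else code) c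
        = c + (if pvEven d1 && pvEven d2 then E else 0) := by
    intro d1 d2 c; exact h3 (pvEven d1 && pvEven d2) c
  have hmid : ∀ (d1 : Int) (c : Int),
      l.foldl (fun code d2 =>
        l.foldl (fun code d3 => if pvEven d1 && pvEven d2 && pvEven d3 then code + 1 else code) code) c
        = c + (if pvEven d1 then E * E else 0) := by
    intro d1 c
    have : (fun (code : Int) (d2 : Int) =>
        l.foldl (fun code d3 => if pvEven d1 && pvEven d2 && pvEven d3 then code + 1 else code) code)
        = fun code d2 => code + (if (fun d => pvEven d1 && pvEven d) d2 then E else 0) := by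
      funext code d2; exact hinner d1 d2 code
    rw [this, pv_foldl_add_ite (fun d => pvEven d1 && pvEven d) E l c, pv_countP_and]
    cases hp : pvEven d1 <;> simp [← hE]
  have houter :
      (fun (code : Int) (d1 : Int) =>
        l.foldl (fun code d2 =>
          l.foldl (fun code d3 => if pvEven d1 && pvEven d2 && pvEven d3 then code + 1 else code) code) code)
      = fun code d1 => code + (if pvEven d1 then E * E else 0) := by
    funext code d1; exact hmid d1 code
  rw [houter, pv_foldl_add_ite pvEven (E * E) l 0]
  ring

-- ===== VERDICT (by name: the statement is the Claim_ definition above) =====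
theorem third_unlock_spec : Claim_equal_third_unlock := by
  intro s e _hdom
  unfold Spec_third_unlock third_unlock_alt
  rw [pv_A_closed]
  by_cases h : e ≤ s
  · simp [h, PySem.List.pyRange_one_eq_nil h]
  · rw [pv_even_count (e - s).toNat s e (by omega)]
    simp [h]
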